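-- pv_equiv track=rewrite | github.com/Keshav077/Competitive-Coding | Code Chef/COVIDLQ.py | following
-- ===== SOURCE A (Python) =====
-- def following(A):
--     step = 1
--     for i in A:
--         if i == 1:
--             if step < 6:
--                 return False
--             step = 1
--         else:
--             step += 1
--     return True
-- ===== SOURCE B (Python) =====
-- def following(A):
--     pos = [-1] + [i for i, x in enumerate(A) if x == 1]
--     return all(b - a >= 6 for a, b in zip(pos, pos[1:]))
-- ===== Notes on version B (the rewrite author's own statement) =====
-- stated objective: alternative
-- what changed: Replaces the running-counter early-return scan with building the index table of 1-positions (with a -1 sentinel) and checking all consecutive differences are >= 6.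
import Mathlib
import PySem

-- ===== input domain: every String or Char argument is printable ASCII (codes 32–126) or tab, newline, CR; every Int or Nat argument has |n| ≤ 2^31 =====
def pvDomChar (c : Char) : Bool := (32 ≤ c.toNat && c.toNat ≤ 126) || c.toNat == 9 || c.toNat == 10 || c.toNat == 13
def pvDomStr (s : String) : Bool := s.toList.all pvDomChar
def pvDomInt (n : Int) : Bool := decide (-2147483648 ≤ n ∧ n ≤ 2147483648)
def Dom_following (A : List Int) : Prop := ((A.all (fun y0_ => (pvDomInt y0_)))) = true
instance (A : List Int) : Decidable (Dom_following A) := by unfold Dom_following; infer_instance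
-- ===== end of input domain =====

-- B builds the index table of 1-positions (sentinel -1) and checks consecutive gaps >= 6, instead of A's running-counter scan.


-- ===== PORT A =====
def followingAux (step : Int) : List Int → Bool
  | [] => true
  | i :: rest =>
    if i = 1 then
      if step < 6 then false else followingAux 1 rest
    else
      followingAux (step + 1) rest

def following (A : List Int) : Bool := followingAux 1 A

-- ===== PORT B =====
def following_alt (A : List Int) : Bool :=
  let pos : List Int :=
    -1 :: (((PySem.List.enumerate A).filter (fun p => p.2 = 1)).map (fun p => p.1))
  (pos.zip pos.tail).all (fun q => q.2 - q.1 ≥ 6)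

-- ===== PRECONDITION & SPEC =====
def Spec_following (A : List Int) (out : Bool) : Prop := out = following_alt A
instance (A : List Int) (out : Bool) : Decidable (Spec_following A out) := by unfold Spec_following; infer_instance

-- ===== CLAIM (what is proved, stated in full; the proofs are below) =====
def Claim_equal_following : Prop := ∀ (A : List Int), Dom_following A → Spec_following A (following A)

-- ===== LEMMAS AND PROOFS =====

/-- Indices (starting at `s`) of the elements equal to 1. -/
def ones (s : Int) : List Int → List Int
  | [] => []
  | x :: xs => if x = 1 then s :: ones (s + 1) xs else ones (s + 1) xs

/-- Gap check with previous position `p`. -/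
def allGap (p : Int) : List Int → Bool
  | [] => true
  | q :: rest => (q - p ≥ 6) && allGap q rest

theorem ones_eq (A : List Int) (s : Int) :
    ((PySem.List.enumerate A s).filter (fun p => p.2 = 1)).map (fun p => p.1) = ones s A := by
  induction A generalizing s with
  | nil => simp [PySem.List.enumerate_nil, ones]
  | cons x xs ih =>
    simp only [PySem.List.enumerate_cons, List.filter_cons, ones]
    by_cases hx : x = 1 <;> simp [hx, ih]

theorem zip_allGap (l : List Int) (p : Int) :
    ((p :: l).zip l).all (fun q => q.2 - q.1 ≥ 6) = allGap p l := by
  induction l generalizing p with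
  | nil => rfl
  | cons q rest ih => simp [List.zip, allGap, ← ih q, List.zipWith]

theorem aux_eq (A : List Int) (step s : Int) :
    followingAux step A = allGap (s - step) (ones s A) := by
  induction A generalizing step s with
  | nil => rfl
  | cons x xs ih =>
    by_cases hx : x = 1
    · have h1 := ih 1 (s + 1)
      have hs : s + 1 - 1 = s := by omega
      by_cases h6 : step < 6
      · simp only [followingAux, ones, hx, if_pos, allGap, h6]
        have h : decide (s - (s - step) ≥ 6) = false := by
          simp only [decide_eq_false_iff_not]; omega
        rw [h, Bool.false_and]
      · simp only [followingAux, ones, hx, allGap, h6, reduceIte, if_false, h1, hs]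
        have h : decide (s - (s - step) ≥ 6) = true := by
          simp only [decide_eq_true_eq]; omega
        rw [h, Bool.true_and]
    · have h1 := ih (step + 1) (s + 1)
      have hs : s + 1 - (step + 1) = s - step := by omega
      simp only [followingAux, ones, hx, reduceIte, h1, hs]

-- ===== VERDICT (by name: the statement is the Claim_ definition above) =====
theorem following_spec : Claim_equal_following := by
  intro A _
  unfold Spec_following following following_alt
  simp only [ones_eq, List.tail_cons, zip_allGap]
  have := aux_eq A 1 0
  simpa using this
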